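-- pv_equiv track=rewrite | github.com/dxlabskku/MARs_Multi-Scale-Convolution-Attention-residual-Fusion-for-Video-Summarization | _MARS_/valid.py | extract_inference_results
-- ===== SOURCE A (Python) =====
-- def extract_inference_results(inference_output):
--     """Extract Split and Final results from inference output, grouped by dataset"""
--     lines = inference_output.strip().split('\n')
--     results = []
--     final_results = []
--     current_dataset = None
--     dataset_splits = []
--
--     for line in lines:
--         line = line.strip()
--
--         # Check for Split results
--         if '[Split' in line and 'Kendall:' in line and 'Spear:' in line:
--             dataset_splits.append(line)
--
--         # Check for Final results (indicates end of dataset)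
--         elif '[FINAL -' in line and 'Kendall:' in line and 'Spear:' in line:
--             # Extract dataset name from FINAL line
--             if 'SumMe' in line:
--                 current_dataset = 'SumMe'
--             elif 'TVSum' in line:
--                 current_dataset = 'TVSum'
--
--             # Add dataset header and splits
--             if current_dataset and dataset_splits:
--                 results.append(f"{current_dataset} Dataset:")
--                 results.extend(dataset_splits)
--                 results.append(line)  # Final result
--                 results.append("")  # Empty line for separation
--
--                 # Store final result for summary
--                 final_results.append((current_dataset, line))
--
--             # Reset for next dataset
--             dataset_splits = []
--             current_dataset = None
--
--     return results, final_results
-- ===== SOURCE B (Python) =====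
-- def _is_split(line):
--     return '[Split' in line and 'Kendall:' in line and 'Spear:' in line
--
--
-- def _is_final(line):
--     return ('[FINAL -' in line and 'Kendall:' in line and 'Spear:' in line
--             and not _is_split(line))
--
--
-- def extract_inference_results(inference_output):
--     """Extract Split and Final results from inference output, grouped by dataset"""
--     lines = [l.strip() for l in inference_output.strip().split('\n')]
--
--     # Phase 1: partition the lines into blocks, each closed by a FINAL line.
--     # Trailing lines after the last FINAL line belong to no block.
--     blocks = []
--     pending = []
--     for line in lines:
--         if _is_final(line):
--             blocks.append((pending, line))
--             pending = []
--         else: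
--             pending.append(line)
--
--     # Phase 2: render every block that has a recognised dataset and splits.
--     results = []
--     final_results = []
--     for body, final in blocks:
--         splits = [l for l in body if _is_split(l)]
--         name = 'SumMe' if 'SumMe' in final else ('TVSum' if 'TVSum' in final else None)
--         if name is not None and splits:
--             results.append(name + " Dataset:")
--             results.extend(splits)
--             results.append(final)
--             results.append("")
--             final_results.append((name, final))
--     return results, final_results
-- ===== Notes on version B (the rewrite author's own statement) =====
-- stated objective: alternative
-- what changed: Replaces A's single stateful scan (mutable current_dataset / dataset_splits with reset-on-FINAL) by a two-phase decomposition: first partition the lines into blocks closed by FINAL lines, then independently render each block.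
import Mathlib
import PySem

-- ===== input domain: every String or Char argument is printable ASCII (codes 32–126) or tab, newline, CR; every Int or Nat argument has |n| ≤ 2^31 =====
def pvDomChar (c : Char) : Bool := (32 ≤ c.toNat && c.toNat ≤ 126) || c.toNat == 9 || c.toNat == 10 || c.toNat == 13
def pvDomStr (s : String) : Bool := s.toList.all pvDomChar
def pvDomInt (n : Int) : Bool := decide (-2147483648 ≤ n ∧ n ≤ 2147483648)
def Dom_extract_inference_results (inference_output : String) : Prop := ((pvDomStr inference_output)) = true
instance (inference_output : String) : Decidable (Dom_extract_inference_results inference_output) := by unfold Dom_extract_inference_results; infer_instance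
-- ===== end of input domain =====

-- B replaces A's single stateful scan (mutable current_dataset/dataset_splits reset on FINAL)
-- by a two-phase decomposition: partition lines into FINAL-closed blocks, then render each block.

-- ===== PORT A =====
-- '[Split' in line and 'Kendall:' in line and 'Spear:' in line
def pvIsSplitA (line : String) : Bool :=
  PySem.Str.isIn "[Split" line && PySem.Str.isIn "Kendall:" line && PySem.Str.isIn "Spear:" line

-- loop body of A over one (already read) line, state = (results, final_results, current_dataset, dataset_splits)
def pvAStep (st : List String × List (String × String) × Option String × List String)
    (line0 : String) : List String × List (String × String) × Option String × List String :=
  let line := PySem.Str.strip line0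
  let (results, final_results, current_dataset, dataset_splits) := st
  if pvIsSplitA line then
    (results, final_results, current_dataset, dataset_splits ++ [line])
  else if PySem.Str.isIn "[FINAL -" line && PySem.Str.isIn "Kendall:" line
          && PySem.Str.isIn "Spear:" line then
    let current_dataset :=
      if PySem.Str.isIn "SumMe" line then some "SumMe"
      else if PySem.Str.isIn "TVSum" line then some "TVSum"
      else current_dataset
    match current_dataset, dataset_splits with
    | some ds, s :: rest =>
        (results ++ [ds ++ " Dataset:"] ++ (s :: rest) ++ [line, ""],
         final_results ++ [(ds, line)], none, [])
    | _, _ =>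
        -- current_dataset falsy or dataset_splits empty: nothing emitted, just reset
        (results, final_results, none, [])
  else
    (results, final_results, current_dataset, dataset_splits)

def extract_inference_results (inference_output : String) : List String × (List (String × String)) :=
  let lines := (PySem.Str.split? (PySem.Str.strip inference_output) "\n").getD []
  let st := lines.foldl pvAStep ([], [], none, [])
  (st.1, st.2.1)

-- ===== PORT B =====
def pvIsSplit (line : String) : Bool :=
  PySem.Str.isIn "[Split" line && PySem.Str.isIn "Kendall:" line && PySem.Str.isIn "Spear:" line

def pvIsFinal (line : String) : Bool :=
  PySem.Str.isIn "[FINAL -" line && PySem.Str.isIn "Kendall:" line && PySem.Str.isIn "Spear:" line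
    && !pvIsSplit line

-- Phase 1: partition into blocks (body, final); trailing lines after the last FINAL are dropped.
def pvToBlocks (pending : List String) : List String → List (List String × String)
  | [] => []
  | l :: ls =>
      if pvIsFinal l then (pending, l) :: pvToBlocks [] ls
      else pvToBlocks (pending ++ [l]) ls

-- Phase 2: render one block.
def pvRenderBlock (acc : List String × List (String × String)) (blk : List String × String) :
    List String × List (String × String) :=
  let (body, final) := blk
  let splits := body.filter pvIsSplit
  let name : Option String :=
    if PySem.Str.isIn "SumMe" final then some "SumMe"
    else if PySem.Str.isIn "TVSum" final then some "TVSum"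
    else none
  match name, splits with
  | some n, _ :: _ =>
      (acc.1 ++ [n ++ " Dataset:"] ++ splits ++ [final, ""], acc.2 ++ [(n, final)])
  | _, _ => acc

def extract_inference_results_alt (inference_output : String) : List String × (List (String × String)) :=
  let lines := ((PySem.Str.split? (PySem.Str.strip inference_output) "\n").getD []).map PySem.Str.strip
  (pvToBlocks [] lines).foldl pvRenderBlock ([], [])

-- ===== PRECONDITION & SPEC =====
def Spec_extract_inference_results (inference_output : String) (out : List String × (List (String × String))) : Prop := out = extract_inference_results_alt inference_output
instance (inference_output : String) (out : List String × (List (String × String))) : Decidable (Spec_extract_inference_results inference_output out) := by unfold Spec_extract_inference_results; infer_instance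

-- ===== CLAIM (what is proved, stated in full; the proofs are below) =====
def Claim_equal_extract_inference_results : Prop := ∀ (inference_output : String), Dom_extract_inference_results inference_output → Spec_extract_inference_results inference_output (extract_inference_results inference_output)

-- ===== LEMMAS AND PROOFS =====

-- the pending buffer left after the loop has consumed `lines` (already stripped)
def pvPendAfter (pending : List String) (lines : List String) : List String :=
  lines.foldl (fun p l => if pvIsFinal l then [] else p ++ [l]) pending

lemma pvAStep_split (r : List String) (f : List (String × String)) (s : List String)
    (l : String) (hs : pvIsSplit (PySem.Str.strip l) = true) :
    pvAStep (r, f, none, s) l = (r, f, none, s ++ [PySem.Str.strip l]) := by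
  have : pvIsSplitA (PySem.Str.strip l) = pvIsSplit (PySem.Str.strip l) := rfl
  simp [pvAStep, this, hs]

lemma pvAStep_other (r : List String) (f : List (String × String)) (s : List String)
    (l : String) (hs : pvIsSplit (PySem.Str.strip l) = false)
    (hf : pvIsFinal (PySem.Str.strip l) = false) :
    pvAStep (r, f, none, s) l = (r, f, none, s) := by
  have hA : pvIsSplitA (PySem.Str.strip l) = false := hs
  simp only [pvIsFinal, hs, Bool.not_false, Bool.and_true] at hf
  simp [pvAStep, hA]
  intro h1 h2 h3
  simp_all

lemma pvAStep_final (r : List String) (f : List (String × String)) (p : List String)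
    (l : String) (hs : pvIsSplit (PySem.Str.strip l) = false)
    (hf : pvIsFinal (PySem.Str.strip l) = true) :
    pvAStep (r, f, none, p.filter pvIsSplit) l =
      ((pvRenderBlock (r, f) (p, PySem.Str.strip l)).1,
       (pvRenderBlock (r, f) (p, PySem.Str.strip l)).2, none, []) := by
  have hA : pvIsSplitA (PySem.Str.strip l) = false := hs
  simp only [pvIsFinal, hs, Bool.not_false, Bool.and_true] at hf
  simp only [pvAStep, hA, hf, Bool.false_eq_true, if_false, if_true, pvRenderBlock]
  by_cases h1 : PySem.Str.isIn "SumMe" (PySem.Str.strip l) = true <;>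
    by_cases h2 : PySem.Str.isIn "TVSum" (PySem.Str.strip l) = true <;>
    cases hsp : p.filter pvIsSplit <;>
    simp_all

-- A's loop, started with current_dataset = none and the split-filtered pending buffer,
-- computes exactly B's rendering of the blocks of `lines`.
lemma pvLoop_eq_blocks (lines : List String) :
    ∀ (pending : List String) (r : List String) (f : List (String × String)),
      lines.foldl pvAStep (r, f, none, pending.filter pvIsSplit)
        = (((pvToBlocks pending (lines.map PySem.Str.strip)).foldl pvRenderBlock (r, f)).1,
          (((pvToBlocks pending (lines.map PySem.Str.strip)).foldl pvRenderBlock (r, f)).2),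
          (none : Option String),
          (pvPendAfter pending (lines.map PySem.Str.strip)).filter pvIsSplit) := by
  induction lines with
  | nil => intro pending r f; simp [pvToBlocks, pvPendAfter]
  | cons l ls ih =>
    intro pending r f
    simp only [List.foldl_cons, List.map_cons]
    by_cases hf : pvIsFinal (PySem.Str.strip l) = true
    · have hs : pvIsSplit (PySem.Str.strip l) = false := by
        by_contra h
        simp only [Bool.not_eq_false] at h
        simp [pvIsFinal, h] at hf
      rw [pvAStep_final r f pending l hs hf]
      have := ih [] (pvRenderBlock (r, f) (pending, PySem.Str.strip l)).1
        (pvRenderBlock (r, f) (pending, PySem.Str.strip l)).2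
      simp only [List.filter_nil] at this
      rw [this]
      simp [pvToBlocks, pvPendAfter, hf]
    · have hf' : pvIsFinal (PySem.Str.strip l) = false := by
        simpa using hf
      by_cases hs : pvIsSplit (PySem.Str.strip l) = true
      · rw [pvAStep_split r f _ l hs]
        have hfl : pending.filter pvIsSplit ++ [PySem.Str.strip l]
            = (pending ++ [PySem.Str.strip l]).filter pvIsSplit := by
          simp [List.filter_append, hs]
        rw [hfl, ih (pending ++ [PySem.Str.strip l]) r f]
        simp [pvToBlocks, pvPendAfter, hf']
      · have hs' : pvIsSplit (PySem.Str.strip l) = false := by simpa using hs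
        rw [pvAStep_other r f _ l hs' hf']
        have hfl : pending.filter pvIsSplit
            = (pending ++ [PySem.Str.strip l]).filter pvIsSplit := by
          simp [List.filter_append, hs']
        rw [hfl, ih (pending ++ [PySem.Str.strip l]) r f]
        simp [pvToBlocks, pvPendAfter, hf']

-- ===== VERDICT (by name: the statement is the Claim_ definition above) =====
theorem extract_inference_results_spec : Claim_equal_extract_inference_results := by
  intro s _
  unfold Spec_extract_inference_results
  have h := pvLoop_eq_blocks ((PySem.Str.split? (PySem.Str.strip s) "\n").getD []) [] [] []
  simp only [List.filter_nil] at h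
  simp only [extract_inference_results, extract_inference_results_alt, h]
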